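-- pv_equiv track=rewrite | github.com/sundy-li/agentflow | app/domain/state_machine.py | state_from_labels
-- ===== SOURCE A (Python) =====
-- from enum import Enum
-- from typing import Iterable, Optional, Union
--
-- class TaskState(str, Enum):
--     AGENT_ISSUE = "agent-issue"
--     AGENT_REVIEWABLE = "agent-reviewable"
--     AGENT_CHANGED = "agent-changed"
--     AGENT_APPROVED = "agent-approved"
--
-- def state_from_labels(labels: Iterable[str]) -> Optional[TaskState]:
--     label_set = set(labels)
--     priority = [
--         TaskState.AGENT_CHANGED,
--         TaskState.AGENT_REVIEWABLE,
--         TaskState.AGENT_APPROVED,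
--         TaskState.AGENT_ISSUE,
--     ]
--     for state in priority:
--         if state.value in label_set:
--             return state
--     return None
-- ===== SOURCE B (Python) =====
-- from enum import Enum
-- from typing import Iterable, Optional
--
-- class TaskState(str, Enum):
--     AGENT_ISSUE = "agent-issue"
--     AGENT_REVIEWABLE = "agent-reviewable"
--     AGENT_CHANGED = "agent-changed"
--     AGENT_APPROVED = "agent-approved"
--
-- _PRIORITY = [
--     TaskState.AGENT_CHANGED,
--     TaskState.AGENT_REVIEWABLE,
--     TaskState.AGENT_APPROVED,
--     TaskState.AGENT_ISSUE,
-- ]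
-- _RANK = {state.value: i for i, state in enumerate(_PRIORITY)}
--
-- def state_from_labels(labels: Iterable[str]) -> Optional[TaskState]:
--     best = None  # lowest rank seen so far
--     for label in labels:
--         r = _RANK.get(label)
--         if r is not None and (best is None or r < best):
--             best = r
--     return None if best is None else _PRIORITY[best]
-- ===== Notes on version B (the rewrite author's own statement) =====
-- stated objective: alternative
-- what changed: Instead of building a set of the labels and scanning the fixed priority list against it, B makes a single pass over the labels keeping the lowest priority rank seen (via a rank dict) and returns the state at that rank.
import Mathlib
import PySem

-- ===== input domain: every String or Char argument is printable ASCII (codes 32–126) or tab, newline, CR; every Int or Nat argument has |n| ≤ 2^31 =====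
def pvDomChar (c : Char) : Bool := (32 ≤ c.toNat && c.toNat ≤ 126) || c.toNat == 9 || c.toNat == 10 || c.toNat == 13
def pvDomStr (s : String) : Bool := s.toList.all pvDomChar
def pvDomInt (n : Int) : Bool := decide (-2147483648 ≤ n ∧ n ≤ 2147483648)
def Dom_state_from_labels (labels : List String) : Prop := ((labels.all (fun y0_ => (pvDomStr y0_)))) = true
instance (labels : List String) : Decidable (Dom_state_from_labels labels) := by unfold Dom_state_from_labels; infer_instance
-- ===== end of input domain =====

-- B scans the labels once keeping the lowest priority rank seen (via a rank dict), instead of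
-- building a set of the labels and scanning the fixed priority list against it (objective: alternative).

-- ===== PORT A =====
-- helper: the 'for state in priority: if state.value in label_set: return state' loop
def pvALoop (labelSet : PySem.Set String) : List String → Option String
  | [] => none
  | s :: rest => if PySem.Set.contains labelSet s then some s else pvALoop labelSet rest

def state_from_labels (labels : List String) : Option String :=
  let labelSet : PySem.Set String := PySem.Set.ofList labels
  let priority : List String := ["agent-changed", "agent-reviewable", "agent-approved", "agent-issue"]
  pvALoop labelSet priority

-- ===== PORT B =====
def pvPriorityB : List String := ["agent-changed", "agent-reviewable", "agent-approved", "agent-issue"]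

-- _RANK = {state.value: i for i, state in enumerate(_PRIORITY)}
def pvRankB : PySem.Dict String Int :=
  (PySem.List.enumerate pvPriorityB).foldl (fun d p => PySem.Dict.insert d p.2 p.1) PySem.Dict.empty

def state_from_labels_alt (labels : List String) : Option String :=
  let best : Option Int := labels.foldl
    (fun best label =>
      match PySem.Dict.get? pvRankB label with
      | none => best
      | some r =>
        match best with
        | none => some r
        | some b => if r < b then some r else best)
    none
  match best with
  | none => none
  | some b => PySem.List.pyGet? pvPriorityB b  -- _PRIORITY[best]; best is always 0..3, in range

-- ===== PRECONDITION & SPEC =====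
def Spec_state_from_labels (labels : List String) (out : Option String) : Prop := out = state_from_labels_alt labels
instance (labels : List String) (out : Option String) : Decidable (Spec_state_from_labels labels out) := by unfold Spec_state_from_labels; infer_instance

-- ===== CLAIM (what is proved, stated in full; the proofs are below) =====
def Claim_equal_state_from_labels : Prop := ∀ (labels : List String), Dom_state_from_labels labels → Spec_state_from_labels labels (state_from_labels labels)

-- ===== LEMMAS AND PROOFS =====

-- the fold's combining step, abstracted
def pvMo : Option Int → Option Int → Option Int
  | best, none => best
  | none, some r => some r
  | some b, some r => if r < b then some r else some b

-- the minimum rank present among the labels, as an if-chain over membership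
def pvG (l : List String) : Option Int :=
  if "agent-changed" ∈ l then some 0
  else if "agent-reviewable" ∈ l then some 1
  else if "agent-approved" ∈ l then some 2
  else if "agent-issue" ∈ l then some 3
  else none

lemma pvRankB_get (s : String) :
    PySem.Dict.get? pvRankB s =
      if s = "agent-changed" then some 0
      else if s = "agent-reviewable" then some 1
      else if s = "agent-approved" then some 2
      else if s = "agent-issue" then some 3
      else none := by
  have hR : pvRankB = PySem.Dict.mk [("agent-changed", 0), ("agent-reviewable", 1),
      ("agent-approved", 2), ("agent-issue", 3)] := by decide
  rw [hR]
  by_cases h0 : s = "agent-changed" <;> by_cases h1 : s = "agent-reviewable" <;>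
    by_cases h2 : s = "agent-approved" <;> by_cases h3 : s = "agent-issue" <;>
    simp_all [PySem.Dict.get?] <;>
    exact ⟨Ne.symm h0, Ne.symm h1, Ne.symm h2, Ne.symm h3⟩

lemma pvMo_assoc (a b c : Option Int) : pvMo (pvMo a b) c = pvMo a (pvMo b c) := by
  rcases a with _ | x <;> rcases b with _ | y <;> rcases c with _ | z <;>
    simp only [pvMo] <;> (try split_ifs) <;> simp only [pvMo] <;> (try split_ifs) <;>
    simp only [Option.some.injEq] <;> first | rfl | omega

lemma pvG_cons (x : String) (l : List String) :
    pvG (x :: l) = pvMo (PySem.Dict.get? pvRankB x) (pvG l) := by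
  rw [pvRankB_get]
  by_cases h0 : x = "agent-changed" <;> by_cases h1 : x = "agent-reviewable" <;>
    by_cases h2 : x = "agent-approved" <;> by_cases h3 : x = "agent-issue" <;>
    by_cases m0 : "agent-changed" ∈ l <;> by_cases m1 : "agent-reviewable" ∈ l <;>
    by_cases m2 : "agent-approved" ∈ l <;> by_cases m3 : "agent-issue" ∈ l <;>
    simp_all [pvG, pvMo] <;> simp_all [Ne.symm h0, Ne.symm h1, Ne.symm h2, Ne.symm h3]

lemma pvFold_eq (l : List String) (b : Option Int) :
    l.foldl
      (fun best label =>
        match PySem.Dict.get? pvRankB label with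
        | none => best
        | some r =>
          match best with
          | none => some r
          | some b => if r < b then some r else best)
      b = pvMo b (pvG l) := by
  induction l generalizing b with
  | nil => simp [pvG, pvMo]
  | cons x l ih =>
    rw [List.foldl_cons, ih, pvG_cons, ← pvMo_assoc]
    congr 1
    rcases h : PySem.Dict.get? pvRankB x with _ | r <;> rcases b with _ | b' <;>
      simp [pvMo]

lemma pvA_chain (labels : List String) :
    state_from_labels labels =
      if "agent-changed" ∈ labels then some "agent-changed"
      else if "agent-reviewable" ∈ labels then some "agent-reviewable"
      else if "agent-approved" ∈ labels then some "agent-approved"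
      else if "agent-issue" ∈ labels then some "agent-issue"
      else none := by
  simp only [state_from_labels, pvALoop]
  by_cases h0 : "agent-changed" ∈ labels <;> by_cases h1 : "agent-reviewable" ∈ labels <;>
    by_cases h2 : "agent-approved" ∈ labels <;> by_cases h3 : "agent-issue" ∈ labels <;>
    simp_all [PySem.Set.mem_ofList, PySem.Set.contains_eq_listContains]

-- ===== VERDICT (by name: the statement is the Claim_ definition above) =====
theorem state_from_labels_spec : Claim_equal_state_from_labels := by
  intro labels _
  unfold Spec_state_from_labels
  rw [pvA_chain]
  show _ = state_from_labels_alt labels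
  unfold state_from_labels_alt
  rw [pvFold_eq]
  by_cases h0 : "agent-changed" ∈ labels <;> by_cases h1 : "agent-reviewable" ∈ labels <;>
    by_cases h2 : "agent-approved" ∈ labels <;> by_cases h3 : "agent-issue" ∈ labels <;>
    simp_all [pvG, pvMo, pvPriorityB, PySem.List.pyGet?, PySem.List.pyIdx?]
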